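-- pv_equiv track=rewrite | github.com/OonXiangYu/Python_GoChess | Python_GoChess/FirstName_LastName_StudentNumber_Project/code/game_logic.py | checkMultipleArr
-- ===== SOURCE A (Python) =====
-- def checkMultipleArr(boardArray, index):
--     def dfs(x, y, group):
--         if x < 0 or y < 0 or x >= len(boardArray) or y >= len(boardArray[0]) or boardArray[x][y] != index:
--             return
--         boardArray[x][y] = -1  # Mark as visited
--         group.append([x, y])
--
--         # Explore all 4 directions
--         dfs(x + 1, y, group)
--         dfs(x - 1, y, group)
--         dfs(x, y + 1, group)
--         dfs(x, y - 1, group)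
--
--     groups = [] # a big arr to store all the group
--     for x in range(len(boardArray)):
--         for y in range(len(boardArray[0])):
--             if boardArray[x][y] == index:  # Start DFS at the first index found
--                 group = []
--                 dfs(x, y, group)
--                 if len(group) > 1: # where there is multiple pieces form a group
--                     groups.append(group)
--
--     return groups
-- ===== SOURCE B (Python) =====
-- def checkMultipleArr(boardArray, index):
--     rows = len(boardArray)
--     cols = len(boardArray[0]) if boardArray else 0
--     groups = []
--     for x in range(rows):
--         for y in range(cols):
--             if boardArray[x][y] == index:
--                 group = []
--                 stack = [(x, y)]
--                 while stack:
--                     cx, cy = stack.pop()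
--                     if 0 <= cx < rows and 0 <= cy < cols and boardArray[cx][cy] == index:
--                         boardArray[cx][cy] = -1  # mark as visited
--                         group.append([cx, cy])
--                         # push reversed so pop order matches the recursive order
--                         stack.append((cx, cy - 1))
--                         stack.append((cx, cy + 1))
--                         stack.append((cx - 1, cy))
--                         stack.append((cx + 1, cy))
--                 if len(group) > 1:
--                     groups.append(group)
--     return groups
-- ===== Notes on version B (the rewrite author's own statement) =====
-- stated objective: alternative
-- what changed: The recursive 4-way DFS is replaced by an iterative DFS with an explicit stack (check/mark at pop time, neighbours pushed in reverse so the pop order equals the recursive call order), with rows/cols hoisted out of the loops.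
-- outside the precondition, e.g. on checkMultipleArr([[-1]], -1): A returns [], B returns []
import Mathlib
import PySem

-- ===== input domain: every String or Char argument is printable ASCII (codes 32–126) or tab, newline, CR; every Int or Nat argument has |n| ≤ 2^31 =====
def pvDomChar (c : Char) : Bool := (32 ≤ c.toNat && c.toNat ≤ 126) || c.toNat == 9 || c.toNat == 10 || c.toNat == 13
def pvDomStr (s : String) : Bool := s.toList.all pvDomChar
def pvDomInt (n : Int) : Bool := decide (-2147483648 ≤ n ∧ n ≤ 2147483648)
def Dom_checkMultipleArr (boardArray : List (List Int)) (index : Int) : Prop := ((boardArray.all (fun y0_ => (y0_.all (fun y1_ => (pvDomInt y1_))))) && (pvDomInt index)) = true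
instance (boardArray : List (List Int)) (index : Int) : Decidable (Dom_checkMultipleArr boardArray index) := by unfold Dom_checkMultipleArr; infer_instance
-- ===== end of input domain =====

-- B replaces A's recursive DFS by an explicit-stack iterative DFS (same preorder); both Pythons
-- mutate boardArray identically (visited cells set to -1); the equivalence proved is about the return value.

-- ===== PORT A =====
-- boardArray[x][y] (both indices already bounds-checked nonneg where consulted decisively)
def pvCell (b : List (List Int)) (x y : Int) : Option Int :=
  (PySem.List.pyGet? b x).bind fun row => PySem.List.pyGet? row y

-- boardArray[x][y] = -1  (only used with 0 ≤ x, 0 ≤ y, in bounds)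
def pvMark (b : List (List Int)) (x y : Int) : List (List Int) :=
  b.modify x.toNat (fun row => row.set y.toNat (-1))

-- number of cells equal to index: used as sufficient recursion fuel for the ported dfs
def pvCnt (index : Int) (b : List (List Int)) : Nat :=
  (b.map (fun row => row.count index)).sum

-- literal port of A's recursive dfs; fuel (pvCnt + 1) bounds the recursion depth
def dfsA (index : Int) : Nat → Int → Int → List (List Int) → List (List Int) →
    List (List Int) × List (List Int)
  | 0, _, _, b, g => (b, g)
  | f + 1, x, y, b, g =>
    if x < 0 ∨ y < 0 ∨ (b.length : Int) ≤ x ∨ ((b.headD []).length : Int) ≤ y ∨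
        pvCell b x y ≠ some index then (b, g)
    else
      let b0 := pvMark b x y
      let g0 := g ++ [[x, y]]
      let r1 := dfsA index f (x + 1) y b0 g0
      let r2 := dfsA index f (x - 1) y r1.1 r1.2
      let r3 := dfsA index f x (y + 1) r2.1 r2.2
      dfsA index f x (y - 1) r3.1 r3.2

def checkMultipleArr (boardArray : List (List Int)) (index : Int) : List (List (List Int)) :=
  ((List.range boardArray.length).foldl (fun st (x : Nat) =>
    (List.range (st.1.headD []).length).foldl (fun st2 (y : Nat) =>
      if pvCell st2.1 (x : Int) (y : Int) = some index then
        let r := dfsA index (pvCnt index st2.1 + 1) (x : Int) (y : Int) st2.1 []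
        (r.1, if 1 < r.2.length then st2.2 ++ [r.2] else st2.2)
      else st2) st) (boardArray, ([] : List (List (List Int))))).2

-- ===== PORT B =====
-- the explicit-stack while loop (head of the list = top of the stack); fuel bounds the pops
def loopB (index : Int) (rows cols : Int) : Nat → List (Int × Int) → List (List Int) →
    List (List Int) → List (List Int) × List (List Int)
  | 0, _, b, g => (b, g)
  | _ + 1, [], b, g => (b, g)
  | f + 1, (x, y) :: rest, b, g =>
    if 0 ≤ x ∧ x < rows ∧ 0 ≤ y ∧ y < cols ∧ pvCell b x y = some index then
      loopB index rows cols f ((x + 1, y) :: (x - 1, y) :: (x, y + 1) :: (x, y - 1) :: rest)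
        (pvMark b x y) (g ++ [[x, y]])
    else loopB index rows cols f rest b g

def checkMultipleArr_alt (boardArray : List (List Int)) (index : Int) : List (List (List Int)) :=
  let rows := boardArray.length
  let cols := (boardArray.headD []).length
  ((List.range rows).foldl (fun st (x : Nat) =>
    (List.range cols).foldl (fun st2 (y : Nat) =>
      if pvCell st2.1 (x : Int) (y : Int) = some index then
        let r := loopB index (rows : Int) (cols : Int) (4 * pvCnt index st2.1 + 1)
          [((x : Int), (y : Int))] st2.1 []
        (r.1, if 1 < r.2.length then st2.2 ++ [r.2] else st2.2)
      else st2) st) (boardArray, ([] : List (List (List Int))))).2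

-- ===== PRECONDITION & SPEC =====
-- Pre_ excludes (a) boards with a row shorter than row 0, on which Python A raises IndexError in
-- its scan loop, and (b) index = -1 on a board that contains a -1 cell, where the -1
-- visited-marker collides with the searched value: both programs then recurse/loop forever on any
-- board with two adjacent -1 cells, and on the remaining such boards the duplicate appends are an
-- accident of the marker choice.
def Pre_checkMultipleArr (boardArray : List (List Int)) (index : Int) : Prop :=
  (∀ row ∈ boardArray, (boardArray.headD []).length ≤ row.length) ∧
    (index ≠ -1 ∨ ∀ row ∈ boardArray, (-1 : Int) ∉ row)

instance (boardArray : List (List Int)) (index : Int) : Decidable (Pre_checkMultipleArr boardArray index) := by unfold Pre_checkMultipleArr; infer_instance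

def pvWitness_checkMultipleArr : List (List Int) × Int := ([[1, 1], [0, 1]], 1)

def Spec_checkMultipleArr (boardArray : List (List Int)) (index : Int) (out : List (List (List Int))) : Prop := out = checkMultipleArr_alt boardArray index
instance (boardArray : List (List Int)) (index : Int) (out : List (List (List Int))) : Decidable (Spec_checkMultipleArr boardArray index out) := by unfold Spec_checkMultipleArr; infer_instance

-- ===== CLAIM (what is proved, stated in full; the proofs are below) =====
def Claim_equal_checkMultipleArr : Prop := ∀ (boardArray : List (List Int)) (index : Int), Dom_checkMultipleArr boardArray index → Pre_checkMultipleArr boardArray index → Spec_checkMultipleArr boardArray index (checkMultipleArr boardArray index)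

-- ===== LEMMAS AND PROOFS =====

-- the board's shape (row lengths); invariant under marking
def shp (b : List (List Int)) : List Nat := b.map List.length

theorem shp_mark (b : List (List Int)) (x y : Int) : shp (pvMark b x y) = shp b := by
  unfold shp pvMark
  generalize x.toNat = n
  induction b generalizing n with
  | nil => simp
  | cons r t ih => cases n <;> simp [List.modify_zero_cons, List.modify_succ_cons, ih]

theorem shp_len {b b' : List (List Int)} (h : shp b = shp b') : b.length = b'.length := by
  have := congrArg List.length h
  simpa [shp] using this

theorem shp_cols {b b' : List (List Int)} (h : shp b = shp b') :
    (b.headD []).length = (b'.headD []).length := by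
  have h0 : ∀ c : List (List Int), (shp c).headD 0 = (c.headD []).length := by
    intro c; cases c <;> simp [shp]
  rw [← h0, ← h0, h]

theorem count_set {i v : Int} (hne : i ≠ v) : ∀ (l : List Int) (n : Nat),
    l[n]? = some i → (l.set n v).count i + 1 = l.count i := by
  intro l
  induction l with
  | nil => intro n h; simp at h
  | cons a t ih =>
    intro n h
    cases n with
    | zero => simp at h; subst h; simp [Ne.symm hne]
    | succ m =>
      simp at h
      have := ih m h
      simp [List.count_cons]
      omega

theorem pvCell_some {b : List (List Int)} {x y i : Int} (hx : 0 ≤ x) (hy : 0 ≤ y)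
    (h : pvCell b x y = some i) :
    ∃ row, b[x.toNat]? = some row ∧ row[y.toNat]? = some i := by
  unfold pvCell at h
  rw [PySem.List.pyGet?_of_nonneg b hx] at h
  cases hrow : b[x.toNat]? with
  | none => rw [hrow] at h; simp at h
  | some row =>
    rw [hrow] at h
    simp only [Option.bind_some] at h
    rw [PySem.List.pyGet?_of_nonneg row hy] at h
    exact ⟨row, rfl, h⟩

theorem shp_dfs (i : Int) (f : Nat) : ∀ (x y : Int) (b g : List (List Int)),
    shp (dfsA i f x y b g).1 = shp b := by
  induction f with
  | zero => intro x y b g; simp [dfsA]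
  | succ f ih =>
    intro x y b g
    rw [dfsA.eq_2]
    split
    · rfl
    · rw [ih, ih, ih, ih, shp_mark]

theorem cnt_pos {i x y : Int} {b : List (List Int)} (hx : 0 ≤ x) (hy : 0 ≤ y)
    (hc : pvCell b x y = some i) : 1 ≤ pvCnt i b := by
  obtain ⟨row, hb, hr⟩ := pvCell_some hx hy hc
  have hmem : row ∈ b := List.mem_of_getElem? hb
  have hi : i ∈ row := List.mem_of_getElem? hr
  calc 1 ≤ row.count i := List.one_le_count_iff.mpr hi
    _ ≤ pvCnt i b := List.le_sum_of_mem (List.mem_map_of_mem hmem)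

theorem cnt_mark {i x y : Int} {b : List (List Int)} (hx : 0 ≤ x) (hy : 0 ≤ y)
    (hc : pvCell b x y = some i) (hi : i ≠ -1) :
    pvCnt i (pvMark b x y) + 1 = pvCnt i b := by
  obtain ⟨row, hb, hr⟩ := pvCell_some hx hy hc
  unfold pvMark pvCnt
  generalize hm : x.toNat = m at hb
  generalize hn : y.toNat = n at hr
  clear hc hm hn
  induction b generalizing m with
  | nil => simp at hb
  | cons r t iht =>
    cases m with
    | zero =>
      simp at hb
      subst hb
      simp only [List.modify_zero_cons, List.map_cons, List.sum_cons]
      have h2 := count_set hi _ n hr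
      omega
    | succ m' =>
      simp at hb
      have h2 := iht m' hb
      simp only [List.modify_succ_cons, List.map_cons, List.sum_cons]
      omega

theorem cnt_dfs_le (i : Int) (hi : i ≠ -1) (f : Nat) : ∀ (x y : Int) (b g : List (List Int)),
    pvCnt i (dfsA i f x y b g).1 ≤ pvCnt i b := by
  induction f with
  | zero => intro x y b g; simp [dfsA]
  | succ f ih =>
    intro x y b g
    rw [dfsA.eq_2]
    split
    · exact le_rfl
    · next h =>
      push Not at h
      obtain ⟨hx, hy, _, _, hc⟩ := h
      have h2 := cnt_mark hx hy hc hi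
      refine le_trans (ih _ _ _ _) (le_trans (ih _ _ _ _) (le_trans (ih _ _ _ _)
        (le_trans (ih _ _ _ _) ?_)))
      omega

theorem dfs_fuel (i : Int) (hi : i ≠ -1) (f₁ : Nat) :
    ∀ (f₂ : Nat) (x y : Int) (b g : List (List Int)), pvCnt i b < f₁ → pvCnt i b < f₂ →
      dfsA i f₁ x y b g = dfsA i f₂ x y b g := by
  induction f₁ with
  | zero => intro f₂ x y b g h1 h2; omega
  | succ a ih =>
    intro f₂ x y b g h1 h2
    cases f₂ with
    | zero => omega
    | succ c =>
      rw [dfsA.eq_2, dfsA.eq_2]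
      split
      · rfl
      · next h =>
        push Not at h
        obtain ⟨hx, hy, _, _, hc⟩ := h
        have hm := cnt_mark hx hy hc hi
        have hp := cnt_pos hx hy hc
        simp only []
        rw [ih c (x+1) y (pvMark b x y) (g ++ [[x, y]]) (by omega) (by omega)]
        have l1 := cnt_dfs_le i hi c (x+1) y (pvMark b x y) (g ++ [[x, y]])
        rw [ih c (x-1) y _ _ (by omega) (by omega)]
        have l2 := cnt_dfs_le i hi c (x-1) y
          (dfsA i c (x+1) y (pvMark b x y) (g ++ [[x, y]])).1
          (dfsA i c (x+1) y (pvMark b x y) (g ++ [[x, y]])).2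
        rw [ih c x (y+1) _ _ (by omega) (by omega)]
        have l3 := cnt_dfs_le i hi c x (y+1)
          (dfsA i c (x-1) y (dfsA i c (x+1) y (pvMark b x y) (g ++ [[x, y]])).1
            (dfsA i c (x+1) y (pvMark b x y) (g ++ [[x, y]])).2).1
          (dfsA i c (x-1) y (dfsA i c (x+1) y (pvMark b x y) (g ++ [[x, y]])).1
            (dfsA i c (x+1) y (pvMark b x y) (g ++ [[x, y]])).2).2
        rw [ih c x (y-1) _ _ (by omega) (by omega)]

theorem loop_nil (i R C : Int) (f : Nat) (b g : List (List Int)) :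
    loopB i R C f [] b g = (b, g) := by
  cases f <;> simp [loopB]

-- canonical-fuel wrappers used only in the proof
def dfsC (i : Int) (x y : Int) (b g : List (List Int)) : List (List Int) × List (List Int) :=
  dfsA i (pvCnt i b + 1) x y b g

def loopC (i R C : Int) (st : List (Int × Int)) (b g : List (List Int)) :
    List (List Int) × List (List Int) :=
  loopB i R C (st.length + 4 * pvCnt i b) st b g

theorem not_guardA {i x y : Int} {b : List (List Int)}
    (h : 0 ≤ x ∧ x < (b.length : Int) ∧ 0 ≤ y ∧ y < ((b.headD []).length : Int) ∧
      pvCell b x y = some i) :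
    ¬(x < 0 ∨ y < 0 ∨ (b.length : Int) ≤ x ∨ ((b.headD []).length : Int) ≤ y ∨
      pvCell b x y ≠ some i) := by
  obtain ⟨hx, hxr, hy, hyc, hc⟩ := h
  intro hcon
  rcases hcon with h | h | h | h | h
  · omega
  · omega
  · omega
  · omega
  · exact h hc

theorem guardA_of_not {i x y : Int} {b : List (List Int)}
    (h : ¬(0 ≤ x ∧ x < (b.length : Int) ∧ 0 ≤ y ∧ y < ((b.headD []).length : Int) ∧
      pvCell b x y = some i)) :
    x < 0 ∨ y < 0 ∨ (b.length : Int) ≤ x ∨ ((b.headD []).length : Int) ≤ y ∨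
      pvCell b x y ≠ some i := by
  by_cases hc : pvCell b x y = some i
  · simp only [hc, and_true] at h
    push Not at h
    omega
  · exact Or.inr (Or.inr (Or.inr (Or.inr hc)))

theorem dfsC_cons (i : Int) (hi : i ≠ -1) (x y : Int) (b g : List (List Int)) :
    dfsC i x y b g =
      if x < 0 ∨ y < 0 ∨ (b.length : Int) ≤ x ∨ ((b.headD []).length : Int) ≤ y ∨
          pvCell b x y ≠ some i
      then (b, g)
      else
        (fun r3 => dfsC i x (y - 1) r3.1 r3.2)
          ((fun r2 => dfsC i x (y + 1) r2.1 r2.2)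
            ((fun r1 => dfsC i (x - 1) y r1.1 r1.2)
              (dfsC i (x + 1) y (pvMark b x y) (g ++ [[x, y]])))) := by
  unfold dfsC
  rw [dfsA.eq_2]
  split
  · rfl
  · next h =>
    push Not at h
    obtain ⟨hx, hy, _, _, hc⟩ := h
    have hm := cnt_mark hx hy hc hi
    simp only []
    rw [dfs_fuel i hi (pvCnt i b) (pvCnt i (pvMark b x y) + 1) (x + 1) y (pvMark b x y)
      (g ++ [[x, y]]) (by omega) (by omega)]
    set r1 := dfsA i (pvCnt i (pvMark b x y) + 1) (x + 1) y (pvMark b x y) (g ++ [[x, y]])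
      with hr1
    have l1 : pvCnt i r1.1 ≤ pvCnt i (pvMark b x y) := by
      rw [hr1]; exact cnt_dfs_le i hi _ _ _ _ _
    rw [dfs_fuel i hi (pvCnt i b) (pvCnt i r1.1 + 1) (x - 1) y r1.1 r1.2 (by omega) (by omega)]
    set r2 := dfsA i (pvCnt i r1.1 + 1) (x - 1) y r1.1 r1.2 with hr2
    have l2 : pvCnt i r2.1 ≤ pvCnt i r1.1 := by
      rw [hr2]; exact cnt_dfs_le i hi _ _ _ _ _
    rw [dfs_fuel i hi (pvCnt i b) (pvCnt i r2.1 + 1) x (y + 1) r2.1 r2.2 (by omega) (by omega)]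
    set r3 := dfsA i (pvCnt i r2.1 + 1) x (y + 1) r2.1 r2.2 with hr3
    have l3 : pvCnt i r3.1 ≤ pvCnt i r2.1 := by
      rw [hr3]; exact cnt_dfs_le i hi _ _ _ _ _
    rw [dfs_fuel i hi (pvCnt i b) (pvCnt i r3.1 + 1) x (y - 1) r3.1 r3.2 (by omega) (by omega)]

theorem loopC_cons (i R C : Int) (hi : i ≠ -1) (x y : Int) (st : List (Int × Int))
    (b g : List (List Int)) :
    loopC i R C ((x, y) :: st) b g =
      if 0 ≤ x ∧ x < R ∧ 0 ≤ y ∧ y < C ∧ pvCell b x y = some i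
      then loopC i R C ((x + 1, y) :: (x - 1, y) :: (x, y + 1) :: (x, y - 1) :: st)
        (pvMark b x y) (g ++ [[x, y]])
      else loopC i R C st b g := by
  unfold loopC
  rw [show ((x, y) :: st).length + 4 * pvCnt i b = (st.length + 4 * pvCnt i b) + 1 from by
    simp only [List.length_cons]; omega]
  rw [loopB.eq_3]
  split
  · next h =>
    obtain ⟨hx, _, hy, _, hc⟩ := h
    have hm := cnt_mark hx hy hc hi
    rw [show st.length + 4 * pvCnt i b =
      ((x + 1, y) :: (x - 1, y) :: (x, y + 1) :: (x, y - 1) :: st).length +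
        4 * pvCnt i (pvMark b x y) from by simp only [List.length_cons]; omega]
  · rfl

theorem cnt_dfsC_le (i : Int) (hi : i ≠ -1) (x y : Int) (b g : List (List Int)) :
    pvCnt i (dfsC i x y b g).1 ≤ pvCnt i b := cnt_dfs_le i hi _ x y b g

theorem bridge (i R C : Int) (hi : i ≠ -1) (n : Nat) :
    ∀ b, pvCnt i b ≤ n → (b.length : Int) = R → (((b.headD []).length : Int)) = C →
      ∀ x y rest g, loopC i R C ((x, y) :: rest) b g =
        (fun r => loopC i R C rest r.1 r.2) (dfsC i x y b g) := by
  induction n with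
  | zero =>
    intro b hn hR hC x y rest g
    subst hR; subst hC
    rw [loopC_cons i _ _ hi, dfsC_cons i hi]
    by_cases hB : 0 ≤ x ∧ x < (b.length : Int) ∧ 0 ≤ y ∧ y < ((b.headD []).length : Int) ∧
        pvCell b x y = some i
    · exfalso
      obtain ⟨hx, _, hy, _, hc⟩ := hB
      have := cnt_pos hx hy hc
      omega
    · rw [if_neg hB, if_pos (guardA_of_not hB)]
  | succ m ih =>
    intro b hn hR hC x y rest g
    subst hR; subst hC
    rw [loopC_cons i _ _ hi, dfsC_cons i hi]
    by_cases hB : 0 ≤ x ∧ x < (b.length : Int) ∧ 0 ≤ y ∧ y < ((b.headD []).length : Int) ∧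
        pvCell b x y = some i
    · rw [if_pos hB, if_neg (not_guardA hB)]
      obtain ⟨hx, _, hy, _, hc⟩ := hB
      have hm := cnt_mark hx hy hc hi
      have sh0 : shp (pvMark b x y) = shp b := shp_mark b x y
      have hL0 : ((pvMark b x y).length : Int) = (b.length : Int) := by
        exact_mod_cast shp_len sh0
      have hC0 : (((pvMark b x y).headD []).length : Int) = ((b.headD []).length : Int) := by
        exact_mod_cast shp_cols sh0
      rw [ih (pvMark b x y) (by omega) hL0 hC0 (x + 1) y
        ((x - 1, y) :: (x, y + 1) :: (x, y - 1) :: rest) (g ++ [[x, y]])]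
      simp only []
      set r1 := dfsC i (x + 1) y (pvMark b x y) (g ++ [[x, y]]) with hr1
      have l1 : pvCnt i r1.1 ≤ pvCnt i (pvMark b x y) := by
        rw [hr1]; exact cnt_dfsC_le i hi _ _ _ _
      have sh1 : shp r1.1 = shp b := by rw [hr1]; exact (shp_dfs i _ _ _ _ _).trans sh0
      have hL1 : (r1.1.length : Int) = (b.length : Int) := by
        exact_mod_cast shp_len sh1
      have hC1 : ((r1.1.headD []).length : Int) = ((b.headD []).length : Int) := by
        exact_mod_cast shp_cols sh1
      rw [ih r1.1 (by omega) hL1 hC1 (x - 1) y ((x, y + 1) :: (x, y - 1) :: rest) r1.2]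
      simp only []
      set r2 := dfsC i (x - 1) y r1.1 r1.2 with hr2
      have l2 : pvCnt i r2.1 ≤ pvCnt i r1.1 := by
        rw [hr2]; exact cnt_dfsC_le i hi _ _ _ _
      have sh2 : shp r2.1 = shp b := by rw [hr2]; exact (shp_dfs i _ _ _ _ _).trans sh1
      have hL2 : (r2.1.length : Int) = (b.length : Int) := by
        exact_mod_cast shp_len sh2
      have hC2 : ((r2.1.headD []).length : Int) = ((b.headD []).length : Int) := by
        exact_mod_cast shp_cols sh2
      rw [ih r2.1 (by omega) hL2 hC2 x (y + 1) ((x, y - 1) :: rest) r2.2]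
      simp only []
      set r3 := dfsC i x (y + 1) r2.1 r2.2 with hr3
      have l3 : pvCnt i r3.1 ≤ pvCnt i r2.1 := by
        rw [hr3]; exact cnt_dfsC_le i hi _ _ _ _
      have sh3 : shp r3.1 = shp b := by rw [hr3]; exact (shp_dfs i _ _ _ _ _).trans sh2
      have hL3 : (r3.1.length : Int) = (b.length : Int) := by
        exact_mod_cast shp_len sh3
      have hC3 : ((r3.1.headD []).length : Int) = ((b.headD []).length : Int) := by
        exact_mod_cast shp_cols sh3
      rw [ih r3.1 (by omega) hL3 hC3 x (y - 1) rest r3.2]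
    · rw [if_neg hB, if_pos (guardA_of_not hB)]

theorem single (i R C : Int) (hi : i ≠ -1) (b g : List (List Int)) (x y : Int)
    (hR : (b.length : Int) = R) (hC : ((b.headD []).length : Int) = C) :
    loopC i R C [(x, y)] b g = dfsC i x y b g := by
  rw [bridge i R C hi (pvCnt i b) b le_rfl hR hC x y [] g]
  simp [loopC, loop_nil]

theorem cell_step_eq (i R C : Int) (hi : i ≠ -1) (b g : List (List Int)) (x y : Int)
    (hR : (b.length : Int) = R) (hC : ((b.headD []).length : Int) = C) :
    loopB i R C (4 * pvCnt i b + 1) [(x, y)] b g = dfsA i (pvCnt i b + 1) x y b g := by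
  rw [show 4 * pvCnt i b + 1 = [(x, y)].length + 4 * pvCnt i b from by
    simp only [List.length_cons, List.length_nil]; omega]
  exact single i R C hi b g x y hR hC

-- the inner (over y) and outer (over x) loop bodies of the two ports, as named functions
def stepA (i : Int) (x : Nat) (st2 : List (List Int) × List (List (List Int))) (y : Nat) :
    List (List Int) × List (List (List Int)) :=
  if pvCell st2.1 (x : Int) (y : Int) = some i then
    let r := dfsA i (pvCnt i st2.1 + 1) (x : Int) (y : Int) st2.1 []
    (r.1, if 1 < r.2.length then st2.2 ++ [r.2] else st2.2)
  else st2

def stepB (i R C : Int) (x : Nat) (st2 : List (List Int) × List (List (List Int))) (y : Nat) :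
    List (List Int) × List (List (List Int)) :=
  if pvCell st2.1 (x : Int) (y : Int) = some i then
    let r := loopB i R C (4 * pvCnt i st2.1 + 1) [((x : Int), (y : Int))] st2.1 []
    (r.1, if 1 < r.2.length then st2.2 ++ [r.2] else st2.2)
  else st2

def outA (i : Int) (st : List (List Int) × List (List (List Int))) (x : Nat) :
    List (List Int) × List (List (List Int)) :=
  (List.range (st.1.headD []).length).foldl (stepA i x) st

def outB (i R C : Int) (cols : Nat) (st : List (List Int) × List (List (List Int))) (x : Nat) :
    List (List Int) × List (List (List Int)) :=
  (List.range cols).foldl (stepB i R C x) st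

theorem step_eq (i R C : Int) (hi : i ≠ -1) (B0 : List (List Int))
    (hR : (B0.length : Int) = R) (hC : ((B0.headD []).length : Int) = C) (x : Nat)
    (st : List (List Int) × List (List (List Int))) (y : Nat) (hst : shp st.1 = shp B0) :
    stepA i x st y = stepB i R C x st y ∧ shp (stepA i x st y).1 = shp B0 := by
  unfold stepA stepB
  by_cases hcond : pvCell st.1 (x : Int) (y : Int) = some i
  · rw [if_pos hcond, if_pos hcond]
    have hR' : (st.1.length : Int) = R := by rw [← hR]; exact_mod_cast shp_len hst
    have hC' : ((st.1.headD []).length : Int) = C := by rw [← hC]; exact_mod_cast shp_cols hst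
    rw [cell_step_eq i R C hi st.1 [] (x : Int) (y : Int) hR' hC']
    exact ⟨rfl, (shp_dfs i _ _ _ _ _).trans hst⟩
  · rw [if_neg hcond, if_neg hcond]
    exact ⟨rfl, hst⟩

theorem inner_eq (i R C : Int) (hi : i ≠ -1) (B0 : List (List Int))
    (hR : (B0.length : Int) = R) (hC : ((B0.headD []).length : Int) = C) (x : Nat) :
    ∀ (ys : List Nat) (st : List (List Int) × List (List (List Int))), shp st.1 = shp B0 →
      ys.foldl (stepA i x) st = ys.foldl (stepB i R C x) st ∧
        shp (ys.foldl (stepA i x) st).1 = shp B0 := by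
  intro ys
  induction ys with
  | nil => intro st hst; exact ⟨rfl, hst⟩
  | cons y ys ih =>
    intro st hst
    obtain ⟨he, hs⟩ := step_eq i R C hi B0 hR hC x st y hst
    rw [List.foldl_cons, List.foldl_cons, ← he]
    exact ih (stepA i x st y) hs

theorem outer_eq (i R C : Int) (hi : i ≠ -1) (B0 : List (List Int))
    (hR : (B0.length : Int) = R) (hC : ((B0.headD []).length : Int) = C) :
    ∀ (xs : List Nat) (st : List (List Int) × List (List (List Int))), shp st.1 = shp B0 →
      xs.foldl (outA i) st = xs.foldl (outB i R C (B0.headD []).length) st ∧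
        shp (xs.foldl (outA i) st).1 = shp B0 := by
  intro xs
  induction xs with
  | nil => intro st hst; exact ⟨rfl, hst⟩
  | cons x xs ih =>
    intro st hst
    have hcols : (st.1.headD []).length = (B0.headD []).length := shp_cols hst
    have hstep : outA i st x = outB i R C (B0.headD []).length st x ∧
        shp (outA i st x).1 = shp B0 := by
      unfold outA outB
      rw [hcols]
      exact inner_eq i R C hi B0 hR hC x (List.range (B0.headD []).length) st hst
    obtain ⟨he, hs⟩ := hstep
    rw [List.foldl_cons, List.foldl_cons, ← he]
    exact ih (outA i st x) hs

theorem main_eq (i : Int) (hi : i ≠ -1) (B0 : List (List Int)) :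
    checkMultipleArr B0 i = checkMultipleArr_alt B0 i := by
  unfold checkMultipleArr checkMultipleArr_alt
  refine congrArg Prod.snd ?_
  show (List.range B0.length).foldl (outA i) (B0, []) =
    (List.range B0.length).foldl
      (outB i (B0.length : Int) ((B0.headD []).length : Int) (B0.headD []).length) (B0, [])
  exact (outer_eq i (B0.length : Int) ((B0.headD []).length : Int) hi B0 rfl rfl
    (List.range B0.length) (B0, []) rfl).1

theorem noMinusOne_cell {b : List (List Int)} (hP : ∀ row ∈ b, (-1 : Int) ∉ row)
    (x y : Nat) : pvCell b (x : Int) (y : Int) ≠ some (-1) := by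
  intro hc
  obtain ⟨row, hb, hr⟩ := pvCell_some (Int.natCast_nonneg x) (Int.natCast_nonneg y) hc
  exact hP row (List.mem_of_getElem? hb) (List.mem_of_getElem? hr)

theorem inner_id {b : List (List Int)}
    (step : List (List Int) × List (List (List Int)) → Nat →
      List (List Int) × List (List (List Int)))
    (hstep : ∀ acc y, step (b, acc) y = (b, acc)) :
    ∀ (ys : List Nat) (acc : List (List (List Int))), ys.foldl step (b, acc) = (b, acc) := by
  intro ys
  induction ys with
  | nil => intro acc; rfl
  | cons y ys ih => intro acc; rw [List.foldl_cons, hstep]; exact ih acc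

theorem main_eq_neg1 (b : List (List Int)) (hP : ∀ row ∈ b, (-1 : Int) ∉ row) :
    checkMultipleArr b (-1) = checkMultipleArr_alt b (-1) := by
  unfold checkMultipleArr checkMultipleArr_alt
  refine congrArg Prod.snd ?_
  have hA : ∀ (acc : List (List (List Int))) (x : Nat),
      outA (-1) (b, acc) x = (b, acc) := by
    intro acc x
    unfold outA
    refine inner_id _ (fun acc2 y => ?_) _ acc
    unfold stepA
    rw [if_neg (noMinusOne_cell hP x y)]
  have hB : ∀ (acc : List (List (List Int))) (x : Nat),
      outB (-1) (b.length : Int) ((b.headD []).length : Int) (b.headD []).length (b, acc) x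
        = (b, acc) := by
    intro acc x
    unfold outB
    refine inner_id _ (fun acc2 y => ?_) _ acc
    unfold stepB
    rw [if_neg (noMinusOne_cell hP x y)]
  show (List.range b.length).foldl (outA (-1)) (b, []) =
    (List.range b.length).foldl
      (outB (-1) (b.length : Int) ((b.headD []).length : Int) (b.headD []).length) (b, [])
  rw [inner_id (outA (-1)) hA, inner_id
    (outB (-1) (b.length : Int) ((b.headD []).length : Int) (b.headD []).length) hB]

-- ===== VERDICT (by name: the statement is the Claim_ definition above) =====
theorem checkMultipleArr_spec : Claim_equal_checkMultipleArr := by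
  intro boardArray index _ hpre
  unfold Spec_checkMultipleArr
  by_cases hne : index = -1
  · subst hne
    exact main_eq_neg1 boardArray (hpre.2.resolve_left (fun h => h rfl))
  · exact main_eq index hne boardArray
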